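-- pv_equiv track=rewrite | github.com/888aha/rythmbingo | compute_pools.py | _bingo_guarantee_failures
-- ===== SOURCE A (Python) =====
-- def _bingo_lines_3x3(rids: list[str]) -> list[tuple[int, int, list[str]]]:
--     """Return bingo lines with deterministic tie-break metadata.
--
--     Returns a list of (kind_rank, pos_rank, line_rhythm_ids).
--
--     kind_rank order:
--       0 = row (top -> bottom)
--       1 = col (left -> right)
--       2 = diag (main, anti)
--     """
--     if len(rids) != 9:
--         raise ValueError(f"Expected 9 rhythm IDs for 3x3, got {len(rids)}")
--
--     # Indices into the flattened 3x3 grid.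
--     idx_lines: list[tuple[int, int, list[int]]] = [
--         # rows
--         (0, 0, [0, 1, 2]),
--         (0, 1, [3, 4, 5]),
--         (0, 2, [6, 7, 8]),
--         # cols
--         (1, 0, [0, 3, 6]),
--         (1, 1, [1, 4, 7]),
--         (1, 2, [2, 5, 8]),
--         # diagonals
--         (2, 0, [0, 4, 8]),  # main
--         (2, 1, [2, 4, 6]),  # anti
--     ]
--     return [(kind, pos, [rids[i] for i in idxs]) for (kind, pos, idxs) in idx_lines]
--
-- def _bingo_guarantee_failures(cards: list[dict], callable_set: set[str]) -> int:
--     """Return count of cards with zero fully-callable bingo lines."""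
--     failures = 0
--     for card in cards:
--         rids = list(card.get("rhythm_ids") or [])
--         ok = False
--         for _kind, _pos, line in _bingo_lines_3x3(rids):
--             if all(x in callable_set for x in line):
--                 ok = True
--                 break
--         if not ok:
--             failures += 1
--     return failures
-- ===== SOURCE B (Python) =====
-- def _bingo_guarantee_failures(cards: list[dict], callable_set: set[str]) -> int:
--     """Return count of cards with zero fully-callable bingo lines."""
--     failures = 0
--     for card in cards:
--         rids = list(card.get("rhythm_ids") or [])
--         if len(rids) != 9:
--             raise ValueError(f"Expected 9 rhythm IDs for 3x3, got {len(rids)}")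
--         # Incremental tic-tac-toe win check: one pass over the 9 cells keeping
--         # row/column/diagonal counters; a line is fully callable iff its counter
--         # reaches 3. No line is ever enumerated.
--         rows = [0, 0, 0]
--         cols = [0, 0, 0]
--         diag = 0
--         anti = 0
--         hit = False
--         for i, r in enumerate(rids):
--             if r not in callable_set:
--                 continue
--             q, m = divmod(i, 3)
--             rows[q] += 1
--             cols[m] += 1
--             if q == m:
--                 diag += 1
--             if q + m == 2:
--                 anti += 1
--             if rows[q] == 3 or cols[m] == 3 or diag == 3 or anti == 3:
--                 hit = True
--                 break
--         if not hit:
--             failures += 1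
--     return failures
-- ===== Notes on version B (the rewrite author's own statement) =====
-- stated objective: alternative
-- what changed: Instead of enumerating the eight bingo lines and testing full set membership per line, B makes one pass over the 9 cells keeping incremental row/column/diagonal counters (the classic O(1)-per-move tic-tac-toe win check) and declares the card ok the moment any counter reaches 3; no line is ever materialized.
import Mathlib
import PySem

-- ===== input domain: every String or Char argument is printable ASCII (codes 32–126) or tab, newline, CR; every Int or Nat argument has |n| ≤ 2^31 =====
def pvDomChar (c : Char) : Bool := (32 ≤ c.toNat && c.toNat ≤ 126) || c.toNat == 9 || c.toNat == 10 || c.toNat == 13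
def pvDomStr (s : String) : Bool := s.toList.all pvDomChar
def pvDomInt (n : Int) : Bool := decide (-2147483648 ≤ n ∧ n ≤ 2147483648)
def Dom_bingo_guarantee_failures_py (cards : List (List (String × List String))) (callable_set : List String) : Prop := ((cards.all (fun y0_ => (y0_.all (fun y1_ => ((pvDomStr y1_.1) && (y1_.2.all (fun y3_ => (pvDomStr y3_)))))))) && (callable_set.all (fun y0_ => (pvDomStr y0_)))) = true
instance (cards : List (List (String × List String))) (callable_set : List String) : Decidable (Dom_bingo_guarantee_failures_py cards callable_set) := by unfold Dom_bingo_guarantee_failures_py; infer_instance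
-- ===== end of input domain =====

-- B replaces A's enumeration of the eight bingo lines (with per-line membership tests) by a
-- single pass over the 9 cells maintaining incremental row/column/diagonal counters, stopping
-- as soon as a counter reaches 3 (objective: alternative).

-- ===== PORT A =====
-- _bingo_lines_3x3; none = the ValueError on len(rids) != 9 (excluded by Pre_).
-- rids[i] for the literal in-range indices 0..8: pyGet? with getD "" never hits the default.
def bingoLines3x3 (rids : List String) : Option (List (Int × Int × List String)) :=
  if rids.length = 9 then
    some (([((0:Int), (0:Int), [(0:Int), 1, 2]), (0, 1, [3, 4, 5]), (0, 2, [6, 7, 8]),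
            (1, 0, [0, 3, 6]), (1, 1, [1, 4, 7]), (1, 2, [2, 5, 8]),
            (2, 0, [0, 4, 8]), (2, 1, [2, 4, 6])]).map
      (fun kpi => (kpi.1, kpi.2.1, kpi.2.2.map (fun i => (PySem.List.pyGet? rids i).getD ""))))
  else none

-- A's inner for-loop over the lines with break = any
def okA (cs : List String) (lines : List (Int × Int × List String)) : Bool :=
  lines.any (fun l => l.2.2.all (fun x => cs.contains x))

-- one card of A's loop body; Option Int accumulator, none = an earlier card raised
def stepA (cs : List String) (acc : Option Int) (card : List (String × List String)) : Option Int :=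
  match acc with
  | none => none
  | some f =>
    -- rids = list(card.get("rhythm_ids") or []): missing key and empty value both give []
    match bingoLines3x3 ((card.lookup "rhythm_ids").getD []) with
    | none => none
    | some lines => if okA cs lines then some f else some (f + 1)

def bingo_guarantee_failures_py (cards : List (List (String × List String))) (callable_set : List String) : Int :=
  (cards.foldl (stepA callable_set) (some 0)).getD 0

-- ===== PORT B =====
-- B's cell loop: counters r0 r1 r2 (rows), c0 c1 c2 (cols), d (main diag), a (anti diag);
-- rows[q] += 1 / cols[m] += 1 become the if-chains below; `true` returned = Python's `break`.
def scanB (cs : List String) (r0 r1 r2 c0 c1 c2 d a : Int) :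
    List (Int × String) → Bool
  | [] => false
  | (i, s) :: rest =>
    if cs.contains s then
      let q := PySem.Int.floordiv i 3
      let m := PySem.Int.mod i 3
      let r0' := if q == 0 then r0 + 1 else r0
      let r1' := if q == 1 then r1 + 1 else r1
      let r2' := if q == 2 then r2 + 1 else r2
      let c0' := if m == 0 then c0 + 1 else c0
      let c1' := if m == 1 then c1 + 1 else c1
      let c2' := if m == 2 then c2 + 1 else c2
      let d' := if q == m then d + 1 else d
      let a' := if q + m == 2 then a + 1 else a
      let rq := if q == 0 then r0' else if q == 1 then r1' else r2'
      let cm := if m == 0 then c0' else if m == 1 then c1' else c2'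
      if rq == 3 || cm == 3 || d' == 3 || a' == 3 then true
      else scanB cs r0' r1' r2' c0' c1' c2' d' a' rest
    else scanB cs r0 r1 r2 c0 c1 c2 d a rest

-- one card of B's loop body; none = the ValueError on len(rids) != 9 (excluded by Pre_)
def stepB (cs : List String) (acc : Option Int) (card : List (String × List String)) : Option Int :=
  match acc with
  | none => none
  | some f =>
    let rids := (card.lookup "rhythm_ids").getD []
    if rids.length = 9 then
      (if scanB cs 0 0 0 0 0 0 0 0 (PySem.List.enumerate rids) then some f else some (f + 1))
    else none

def bingo_guarantee_failures_py_alt (cards : List (List (String × List String))) (callable_set : List String) : Int :=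
  (cards.foldl (stepB callable_set) (some 0)).getD 0

-- ===== PRECONDITION & SPEC =====
-- Pre_ excludes exactly the inputs on which A raises ValueError: a card whose "rhythm_ids"
-- value (missing key / empty value both normalizing to []) does not have exactly 9 entries.
def Pre_bingo_guarantee_failures_py (cards : List (List (String × List String))) (callable_set : List String) : Prop :=
  ∀ card ∈ cards, ((card.lookup "rhythm_ids").getD []).length = 9

instance (cards : List (List (String × List String))) (callable_set : List String) : Decidable (Pre_bingo_guarantee_failures_py cards callable_set) := by unfold Pre_bingo_guarantee_failures_py; infer_instance

def pvWitness_bingo_guarantee_failures_py : (List (List (String × List String))) × List String :=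
  ([[("rhythm_ids", ["a", "b", "c", "d", "e", "f", "g", "h", "i"])],
    [("rhythm_ids", ["a", "a", "a", "x", "y", "z", "x", "y", "z"])]], ["a", "b", "c"])

def Spec_bingo_guarantee_failures_py (cards : List (List (String × List String))) (callable_set : List String) (out : Int) : Prop := out = bingo_guarantee_failures_py_alt cards callable_set
instance (cards : List (List (String × List String))) (callable_set : List String) (out : Int) : Decidable (Spec_bingo_guarantee_failures_py cards callable_set out) := by unfold Spec_bingo_guarantee_failures_py; infer_instance

-- ===== CLAIM (what is proved, stated in full; the proofs are below) =====
def Claim_equal_bingo_guarantee_failures_py : Prop := ∀ (cards : List (List (String × List String))) (callable_set : List String), Dom_bingo_guarantee_failures_py cards callable_set → Pre_bingo_guarantee_failures_py cards callable_set → Spec_bingo_guarantee_failures_py cards callable_set (bingo_guarantee_failures_py cards callable_set)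

-- ===== LEMMAS AND PROOFS =====

lemma list_len9 {α : Type} (l : List α) (h : l.length = 9) :
    ∃ a b c d e f g h' i, l = [a, b, c, d, e, f, g, h', i] := by
  match l, h with
  | [a, b, c, d, e, f, g, h', i], _ => exact ⟨a, b, c, d, e, f, g, h', i, rfl⟩

-- proof-only Bool mirror of scanB: the membership test replaced by a precomputed Bool
def scanBb (r0 r1 r2 c0 c1 c2 d a : Int) : List (Int × Bool) → Bool
  | [] => false
  | (i, b) :: rest =>
    if b then
      let q := PySem.Int.floordiv i 3
      let m := PySem.Int.mod i 3
      let r0' := if q == 0 then r0 + 1 else r0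
      let r1' := if q == 1 then r1 + 1 else r1
      let r2' := if q == 2 then r2 + 1 else r2
      let c0' := if m == 0 then c0 + 1 else c0
      let c1' := if m == 1 then c1 + 1 else c1
      let c2' := if m == 2 then c2 + 1 else c2
      let d' := if q == m then d + 1 else d
      let a' := if q + m == 2 then a + 1 else a
      let rq := if q == 0 then r0' else if q == 1 then r1' else r2'
      let cm := if m == 0 then c0' else if m == 1 then c1' else c2'
      if rq == 3 || cm == 3 || d' == 3 || a' == 3 then true
      else scanBb r0' r1' r2' c0' c1' c2' d' a' rest
    else scanBb r0 r1 r2 c0 c1 c2 d a rest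

lemma scanB_map (cs : List String) (l : List (Int × String))
    (r0 r1 r2 c0 c1 c2 d a : Int) :
    scanB cs r0 r1 r2 c0 c1 c2 d a l
      = scanBb r0 r1 r2 c0 c1 c2 d a (l.map (fun p => (p.1, cs.contains p.2))) := by
  induction l generalizing r0 r1 r2 c0 c1 c2 d a with
  | nil => rfl
  | cons p t ih =>
    obtain ⟨i, s⟩ := p
    cases h : cs.contains s <;> simp [scanB, scanBb, ih]

-- the per-card heart of the proof: A's eight line checks = B's counter scan
lemma ok_eq (cs : List String) (r0 r1 r2 r3 r4 r5 r6 r7 r8 : String) :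
    okA cs [((0:Int), (0:Int), [r0, r1, r2]), (0, 1, [r3, r4, r5]), (0, 2, [r6, r7, r8]),
            (1, 0, [r0, r3, r6]), (1, 1, [r1, r4, r7]), (1, 2, [r2, r5, r8]),
            (2, 0, [r0, r4, r8]), (2, 1, [r2, r4, r6])]
    = scanB cs 0 0 0 0 0 0 0 0
        (PySem.List.enumerate [r0, r1, r2, r3, r4, r5, r6, r7, r8]) := by
  simp only [okA, List.any_cons, List.any_nil, List.all_cons, List.all_nil,
    PySem.List.enumerate_cons, PySem.List.enumerate_nil]
  rw [scanB_map]
  simp only [List.map_cons, List.map_nil]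
  generalize cs.contains r0 = b0
  generalize cs.contains r1 = b1
  generalize cs.contains r2 = b2
  generalize cs.contains r3 = b3
  generalize cs.contains r4 = b4
  generalize cs.contains r5 = b5
  generalize cs.contains r6 = b6
  generalize cs.contains r7 = b7
  generalize cs.contains r8 = b8
  revert b0 b1 b2 b3 b4 b5 b6 b7 b8
  decide

lemma step_eq (cs : List String) (f : Int) (card : List (String × List String))
    (h : ((card.lookup "rhythm_ids").getD []).length = 9) :
    stepA cs (some f) card = stepB cs (some f) card := by
  obtain ⟨r0, r1, r2, r3, r4, r5, r6, r7, r8, hr⟩ := list_len9 _ h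
  have hb : bingoLines3x3 [r0, r1, r2, r3, r4, r5, r6, r7, r8]
      = some [((0:Int), (0:Int), [r0, r1, r2]), (0, 1, [r3, r4, r5]), (0, 2, [r6, r7, r8]),
              (1, 0, [r0, r3, r6]), (1, 1, [r1, r4, r7]), (1, 2, [r2, r5, r8]),
              (2, 0, [r0, r4, r8]), (2, 1, [r2, r4, r6])] := rfl
  simp only [stepA, stepB, hr, hb, List.length_cons, List.length_nil, if_pos]
  rw [ok_eq]

theorem bingo_spec_aux (cards : List (List (String × List String))) (cs : List String)
    (h : ∀ card ∈ cards, ((card.lookup "rhythm_ids").getD []).length = 9) (f : Int) :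
    cards.foldl (stepA cs) (some f) = cards.foldl (stepB cs) (some f) := by
  induction cards generalizing f with
  | nil => rfl
  | cons c cs' ih =>
    have h9 := h c (by simp)
    simp only [List.foldl_cons]
    rw [step_eq cs f c h9]
    cases hb : stepB cs (some f) c with
    | none =>
      exfalso
      simp only [stepB] at hb
      rw [if_pos h9] at hb
      split at hb <;> simp_all
    | some g =>
      exact ih (fun card hc => h card (by simp [hc])) g

-- ===== VERDICT (by name: the statement is the Claim_ definition above) =====
theorem bingo_guarantee_failures_py_spec : Claim_equal_bingo_guarantee_failures_py := by
  intro cards cs _ hpre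
  unfold Spec_bingo_guarantee_failures_py bingo_guarantee_failures_py bingo_guarantee_failures_py_alt
  rw [bingo_spec_aux cards cs hpre 0]
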